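-- pv_equiv track=rewrite | github.com/Hyeontae1112/TWI | Simplicial_Complex.py | Z2n_bin
-- ===== SOURCE A (Python) =====
-- from itertools import combinations, product, permutations
--
-- def Z2n_bin(n):
--     V=[]
--     E=[2**(i) for i in range(n-1, -1, -1)]
--     N=range(n)
--     for i in range(1,n+1):
--         C=combinations(E,i)
--         for c in C:
--             V.append(sum(c))
--     return V
-- ===== SOURCE B (Python) =====
-- def Z2n_bin(n):
--     # Backtracking over index positions, maintaining a running partial sum:
--     # no power list and no tuples are materialized.
--     def go(lo, k, acc):
--         if k == 0:
--             return [acc]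
--         res = []
--         for j in range(lo, n):
--             res += go(j + 1, k - 1, acc + (1 << (n - 1 - j)))
--         return res
--     out = []
--     for i in range(1, n + 1):
--         out += go(0, i, 0)
--     return out
-- ===== Notes on version B (the rewrite author's own statement) =====
-- stated objective: alternative
-- what changed: replaces the itertools.combinations pass that materializes each subset tuple and then sums it by a recursive backtracking over index positions that carries the running partial sum (computed by bit shift), never building the power list or any tuples
import Mathlib
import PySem

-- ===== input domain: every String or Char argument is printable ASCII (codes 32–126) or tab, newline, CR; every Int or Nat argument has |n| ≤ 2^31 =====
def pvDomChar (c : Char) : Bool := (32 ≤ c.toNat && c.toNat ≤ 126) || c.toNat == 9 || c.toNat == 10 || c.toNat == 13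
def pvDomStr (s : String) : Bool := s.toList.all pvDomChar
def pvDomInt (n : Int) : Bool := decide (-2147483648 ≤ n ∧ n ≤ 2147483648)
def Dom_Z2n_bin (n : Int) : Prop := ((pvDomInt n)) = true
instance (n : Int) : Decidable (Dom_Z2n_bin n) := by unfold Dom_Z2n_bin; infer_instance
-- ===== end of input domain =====

-- B replaces the combinations-then-sum pass by index backtracking with a running partial sum (alternative, not faster).


-- ===== PORT A =====
-- itertools.combinations(xs, k) in Python's emission order (lexicographic by index).
def pvCombs (xs : List Int) (k : Nat) : List (List Int) :=
  match k, xs with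
  | 0, _ => [[]]
  | _ + 1, [] => []
  | k + 1, x :: rest => ((pvCombs rest k).map (fun c => x :: c)) ++ pvCombs rest (k + 1)

-- literal port of A; every i drawn from range(n-1,-1,-1) and range(1,n+1) is ≥ 0, so i.toNat is exact
def Z2n_bin (n : Int) : List Int :=
  let E := (PySem.List.pyRange (n - 1) (-1) (-1)).map (fun i => (2 : Int) ^ i.toNat)
  (PySem.List.pyRange 1 (n + 1) 1).foldl
    (fun V i => (pvCombs E i.toNat).foldl (fun V c => V ++ [c.sum]) V) []

-- ===== PORT B =====
-- Source B's go(lo, k, acc): backtrack over positions j in range(lo, n), carrying the running sum acc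
def pvGo (n : Nat) (lo : Nat) (k : Nat) (acc : Int) : List Int :=
  match k with
  | 0 => [acc]
  | k' + 1 =>
    (List.range' lo (n - lo)).foldl
      (fun res j => res ++ pvGo n (j + 1) k' (acc + ((1 : Int) <<< (n - 1 - j)))) []

def Z2n_bin_alt (n : Int) : List Int :=
  (PySem.List.pyRange 1 (n + 1) 1).foldl (fun out i => out ++ pvGo n.toNat 0 i.toNat 0) []

-- ===== PRECONDITION & SPEC =====
def Spec_Z2n_bin (n : Int) (out : List Int) : Prop := out = Z2n_bin_alt n
instance (n : Int) (out : List Int) : Decidable (Spec_Z2n_bin n out) := by unfold Spec_Z2n_bin; infer_instance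

-- ===== CLAIM (what is proved, stated in full; the proofs are below) =====
def Claim_equal_Z2n_bin : Prop := ∀ (n : Int), Dom_Z2n_bin n → Spec_Z2n_bin n (Z2n_bin n)

-- ===== LEMMAS AND PROOFS =====

-- list-level form of pvGo: recursion over the remaining power list instead of indices
def pvGoL (xs : List Int) (k : Nat) (acc : Int) : List Int :=
  match k, xs with
  | 0, _ => [acc]
  | _ + 1, [] => []
  | k + 1, x :: rest => pvGoL rest k (acc + x) ++ pvGoL rest (k + 1) acc

-- the suffix of B's implicit power list from position lo
def pvExps (n lo : Nat) : List Int := (List.range' lo (n - lo)).map (fun j => (1 : Int) <<< (n - 1 - j))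

lemma pvExps_nil (n lo : Nat) (h : n ≤ lo) : pvExps n lo = [] := by
  simp [pvExps, Nat.sub_eq_zero_of_le h]

lemma pvExps_cons (n lo : Nat) (h : lo < n) :
    pvExps n lo = (1 : Int) <<< (n - 1 - lo) :: pvExps n (lo + 1) := by
  unfold pvExps
  rw [show n - lo = (n - (lo + 1)) + 1 by omega, List.range'_succ]
  simp

lemma pvGo_eq_pvGoL (n : Nat) : ∀ k lo acc, pvGo n lo k acc = pvGoL (pvExps n lo) k acc := by
  intro k
  induction k with
  | zero =>
    intro lo acc
    cases h : pvExps n lo <;> simp [pvGo, pvGoL]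
  | succ k ih =>
    intro lo acc
    have main : ∀ d lo acc, n - lo = d → pvGo n lo (k + 1) acc = pvGoL (pvExps n lo) (k + 1) acc := by
      intro d
      induction d with
      | zero =>
        intro lo acc hd
        rw [pvExps_nil n lo (by omega)]
        simp [pvGo, pvGoL, hd]
      | succ d ihd =>
        intro lo acc hd
        have hlt : lo < n := by omega
        rw [pvExps_cons n lo hlt]
        show (List.range' lo (n - lo)).foldl
            (fun res j => res ++ pvGo n (j + 1) k (acc + ((1 : Int) <<< (n - 1 - j)))) [] = _
        rw [hd, List.range'_succ,
          PySem.List.foldl_append_eq_flatMap (fun j => pvGo n (j + 1) k (acc + ((1 : Int) <<< (n - 1 - j))))]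
        have hrest : (List.range' (lo + 1) d).flatMap
            (fun j => pvGo n (j + 1) k (acc + ((1 : Int) <<< (n - 1 - j)))) =
            pvGo n (lo + 1) (k + 1) acc := by
          show _ = (List.range' (lo + 1) (n - (lo + 1))).foldl
            (fun res j => res ++ pvGo n (j + 1) k (acc + ((1 : Int) <<< (n - 1 - j)))) []
          rw [show n - (lo + 1) = d by omega,
            PySem.List.foldl_append_eq_flatMap (fun j => pvGo n (j + 1) k (acc + ((1 : Int) <<< (n - 1 - j))))]
          simp
        simp only [List.flatMap_cons, List.nil_append]
        rw [hrest, ih, ihd (lo + 1) acc (by omega)]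
        simp [pvGoL]
    exact main (n - lo) lo acc rfl

lemma pvGoL_eq_map : ∀ (xs : List Int) (k : Nat) (acc : Int),
    pvGoL xs k acc = (pvCombs xs k).map (fun c => acc + c.sum) := by
  intro xs
  induction xs with
  | nil => intro k acc; cases k <;> simp [pvGoL, pvCombs]
  | cons x rest ih =>
    intro k acc
    cases k with
    | zero => simp [pvGoL, pvCombs]
    | succ k =>
      simp only [pvGoL, pvCombs, List.map_append, List.map_map, ih]
      congr 1
      apply List.map_congr_left
      intro c _
      simp [Function.comp]
      ring

-- A's power list E equals B's implicit power list
lemma E_eq_pvExps (n : Int) :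
    (PySem.List.pyRange (n - 1) (-1) (-1)).map (fun i => (2 : Int) ^ i.toNat) = pvExps n.toNat 0 := by
  rw [PySem.List.pyRange_neg_one]
  unfold pvExps
  rw [Nat.sub_zero, ← List.range_eq_range']
  rw [show (n - 1 - -1).toNat = n.toNat by omega]
  simp only [List.map_map]
  apply List.map_congr_left
  intro k hk
  rw [List.mem_range] at hk
  simp only [Function.comp]
  rw [Int.shiftLeft_eq, one_mul]
  congr 1
  omega

theorem Z2n_bin_spec_aux (n : Int) : Z2n_bin n = Z2n_bin_alt n := by
  unfold Z2n_bin Z2n_bin_alt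
  dsimp only
  congr 1
  funext V i
  rw [PySem.List.foldl_append_singleton_eq_map, pvGo_eq_pvGoL, pvGoL_eq_map, E_eq_pvExps]
  simp

-- ===== VERDICT (by name: the statement is the Claim_ definition above) =====
theorem Z2n_bin_spec : Claim_equal_Z2n_bin := by
  intro n _
  exact Z2n_bin_spec_aux n
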